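-- pv_equiv track=rewrite | github.com/MaslovMykhailo/binary-relations | src/lab6.py | isStrongAntireflexive
-- ===== SOURCE A (Python) =====
-- def isAntireflexive(relation):
--     size = len(relation)
--     for i in range(size):
--         if relation[i][i] != 0:
--             return False
--     return True
--
-- def isStrongAntireflexive(relation):
--     if not isAntireflexive(relation):
--         return False;
--
--     size = len(relation)
--     for i in range(size):
--         for j in range(size):
--             if i == j:
--                 continue
--             if relation[i][j] == 0:
--                 return False
--     return True
-- ===== SOURCE B (Python) =====
-- def isStrongAntireflexive(relation):
--     # one fused pass: a cell (i, j) is correct iff it is zero exactly on the diagonal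
--     return all((v == 0) == (i == j)
--                for i, row in enumerate(relation)
--                for j, v in enumerate(row))
-- ===== Notes on version B (the rewrite author's own statement) =====
-- stated objective: simpler
-- what changed: Replaces the isAntireflexive helper plus two separate index-based passes over range(len(relation)) by one fused enumerate-driven comprehension checking the single predicate (v == 0) == (i == j) per actual cell.
-- intended difference: On matrices whose n x n part (n = len(relation)) is perfectly strongly antireflexive but some row extends past column n with a zero there, A returns True because it never reads any cell beyond column n, while B returns False, the intended value since that row has a zero off the diagonal. — e.g. on isStrongAntireflexive([[0, 0]]): A returns true, B returns false
import Mathlib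
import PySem

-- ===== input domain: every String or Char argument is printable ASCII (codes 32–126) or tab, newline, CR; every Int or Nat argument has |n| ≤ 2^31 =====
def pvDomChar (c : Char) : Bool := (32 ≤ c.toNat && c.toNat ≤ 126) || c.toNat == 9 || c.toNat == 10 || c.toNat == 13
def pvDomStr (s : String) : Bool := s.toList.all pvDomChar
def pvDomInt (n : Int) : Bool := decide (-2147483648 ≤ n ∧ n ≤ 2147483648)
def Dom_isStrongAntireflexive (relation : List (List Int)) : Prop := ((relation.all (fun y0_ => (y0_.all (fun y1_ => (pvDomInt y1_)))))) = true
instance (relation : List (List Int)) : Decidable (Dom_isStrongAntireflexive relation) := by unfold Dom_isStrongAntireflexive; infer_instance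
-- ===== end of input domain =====

-- B fuses A's isAntireflexive helper plus two index-based passes into one enumerate-driven pass with a single per-cell predicate; on rows extending past column n it checks the extra cells A never reads (objective: simpler).


-- ===== PORT A =====
-- relation[i][i] / relation[i][j] are ported via getD; Pre_ admits exactly the inputs where
-- Python's scan never reaches an out-of-range access, so the defaults are never the value used
-- before an early False already fixed the result.
def isAntireflexive (relation : List (List Int)) : Bool :=
  (List.range relation.length).all (fun i => (relation.getD i []).getD i 0 == 0)

def isStrongAntireflexive (relation : List (List Int)) : Bool :=
  if !isAntireflexive relation then false
  else
    (List.range relation.length).all (fun i =>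
      (List.range relation.length).all (fun j =>
        if i == j then true else (relation.getD i []).getD j 0 != 0))

-- ===== PORT B =====
def isStrongAntireflexive_alt (relation : List (List Int)) : Bool :=
  (PySem.List.enumerate relation).all (fun p =>
    (PySem.List.enumerate p.2).all (fun q => (q.2 == 0) == (p.1 == q.1)))

-- ===== PRECONDITION & SPEC =====
-- Pre_ holds exactly where Python A returns normally (no IndexError): either the diagonal scan hits a
-- nonzero diagonal entry before any out-of-range access, or the whole diagonal is in range and zero and
-- the off-diagonal scan either never leaves the rows' bounds or hits an in-range zero first.
def Pre_isStrongAntireflexive (relation : List (List Int)) : Prop :=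
  (∃ i < relation.length,
      (∀ k < i, k < (relation.getD k []).length ∧ (relation.getD k []).getD k 0 = 0) ∧
      i < (relation.getD i []).length ∧ (relation.getD i []).getD i 0 ≠ 0)
  ∨ ((∀ i < relation.length, i < (relation.getD i []).length ∧ (relation.getD i []).getD i 0 = 0) ∧
     ((∀ i < relation.length, relation.length ≤ (relation.getD i []).length)
      ∨ (∃ i < relation.length, ∃ j < relation.length, i ≠ j ∧
           j < (relation.getD i []).length ∧ (relation.getD i []).getD j 0 = 0 ∧
           (∀ i' < relation.length, ∀ j' < relation.length, i' ≠ j' →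
              (i' < i ∨ (i' = i ∧ j' < j)) → j' < (relation.getD i' []).length))))
instance (relation : List (List Int)) : Decidable (Pre_isStrongAntireflexive relation) := by
  unfold Pre_isStrongAntireflexive; infer_instance

def pvWitness_isStrongAntireflexive : List (List Int) := [[0, 1], [2, 0]]

-- On matrices whose n×n part (n = len(relation)) is perfectly strongly antireflexive but some row
-- extends past column n with a zero there, A returns True because it never reads any cell beyond
-- column n, while B returns False, the intended value: that row has a zero off the diagonal.
def D_isStrongAntireflexive (relation : List (List Int)) : Prop :=
  (∀ i < relation.length, i < (relation.getD i []).length ∧ (relation.getD i []).getD i 0 = 0) ∧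
  (∀ i < relation.length, ∀ j < relation.length, i ≠ j →
      j < (relation.getD i []).length ∧ (relation.getD i []).getD j 0 ≠ 0) ∧
  (∃ i < relation.length, ∃ j < (relation.getD i []).length,
      relation.length ≤ j ∧ (relation.getD i []).getD j 0 = 0)
instance (relation : List (List Int)) : Decidable (D_isStrongAntireflexive relation) := by
  unfold D_isStrongAntireflexive; infer_instance

def Spec_isStrongAntireflexive (relation : List (List Int)) (out : Bool) : Prop :=
  ¬ D_isStrongAntireflexive relation → out = isStrongAntireflexive_alt relation
instance (relation : List (List Int)) (out : Bool) : Decidable (Spec_isStrongAntireflexive relation out) := by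
  unfold Spec_isStrongAntireflexive; infer_instance

def pvDiffWitness_isStrongAntireflexive : List (List Int) := [[0, 0]]
def pvDiffWitnessOut_isStrongAntireflexive : Bool × Bool := (true, false)

-- ===== CLAIM (what is proved, stated in full; the proofs are below) =====
def Claim_unchanged_isStrongAntireflexive : Prop := ∀ (relation : List (List Int)), Dom_isStrongAntireflexive relation → Pre_isStrongAntireflexive relation → Spec_isStrongAntireflexive relation (isStrongAntireflexive relation)
def Claim_changed_isStrongAntireflexive : Prop := Dom_isStrongAntireflexive (pvDiffWitness_isStrongAntireflexive) ∧ Pre_isStrongAntireflexive (pvDiffWitness_isStrongAntireflexive) ∧ D_isStrongAntireflexive (pvDiffWitness_isStrongAntireflexive) ∧ isStrongAntireflexive (pvDiffWitness_isStrongAntireflexive) = pvDiffWitnessOut_isStrongAntireflexive.1 ∧ isStrongAntireflexive_alt (pvDiffWitness_isStrongAntireflexive) = pvDiffWitnessOut_isStrongAntireflexive.2 ∧ pvDiffWitnessOut_isStrongAntireflexive.1 ≠ pvDiffWitnessOut_isStrongAntireflexive.2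
def Claim_exact_isStrongAntireflexive : Prop := ∀ (relation : List (List Int)), Dom_isStrongAntireflexive relation → Pre_isStrongAntireflexive relation → D_isStrongAntireflexive relation → isStrongAntireflexive relation ≠ isStrongAntireflexive_alt relation

-- ===== LEMMAS AND PROOFS =====

-- A's value: diagonal entries read as 0 when out of range (phase 1), off-diagonal reads out of
-- range count as a hit (0 != 0 is false); inside Pre_ these defaults never decide the result.
theorem isStrongAntireflexive_iff (relation : List (List Int)) :
    isStrongAntireflexive relation = true ↔
      (∀ i < relation.length, (relation.getD i []).getD i 0 = 0) ∧
      (∀ i < relation.length, ∀ j < relation.length, i ≠ j →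
          (relation.getD i []).getD j 0 ≠ 0) := by
  unfold isStrongAntireflexive isAntireflexive
  by_cases hd : ∀ i < relation.length, (relation.getD i []).getD i 0 = 0
  · have ht : (List.range relation.length).all
        (fun i => (relation.getD i []).getD i 0 == 0) = true := by
      simp only [List.all_eq_true, List.mem_range, beq_iff_eq]
      exact hd
    rw [ht]
    simp only [Bool.not_true, Bool.false_eq_true, if_false,
      List.all_eq_true, List.mem_range]
    constructor
    · intro hall
      refine ⟨hd, fun i hi j hj hij => ?_⟩
      have := hall i hi j hj
      rw [if_neg (by simpa using hij)] at this
      exact bne_iff_ne.mp this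
    · rintro ⟨-, hoff⟩ i hi j hj
      by_cases hij : i = j
      · simp [hij]
      · rw [if_neg (by simpa using hij)]
        simpa using hoff i hi j hj hij
  · have hf : (List.range relation.length).all
        (fun i => (relation.getD i []).getD i 0 == 0) = false := by
      simp only [List.all_eq_false, List.mem_range, beq_iff_eq]
      push Not at hd
      obtain ⟨i, hi, hne⟩ := hd
      exact ⟨i, hi, by simpa using hne⟩
    rw [hf]
    simp only [Bool.not_false, if_true, Bool.false_eq_true, false_iff]
    push Not at hd
    obtain ⟨i, hi, hne⟩ := hd
    exact fun h => hne (h.1 i hi)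

theorem isStrongAntireflexive_alt_iff (relation : List (List Int)) :
    isStrongAntireflexive_alt relation = true ↔
      ∀ i < relation.length, ∀ j < (relation.getD i []).length,
        ((relation.getD i []).getD j 0 = 0 ↔ i = j) := by
  unfold isStrongAntireflexive_alt
  simp only [List.all_eq_true, PySem.List.mem_enumerate_iff]
  constructor
  · intro hall i hi j hj
    have hRow : relation.getD i [] = relation[i] := List.getD_eq_getElem relation [] hi
    have hj' : j < relation[i].length := by rw [← hRow]; exact hj
    have h := hall (0 + (i : Int), relation[i]) ⟨i, hi, rfl⟩
        (0 + (j : Int), relation[i][j]) ⟨j, hj', rfl⟩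
    have h' : (relation[i][j] = 0 ↔ (0 : Int) + i = 0 + j) := by
      simpa using Eq.to_iff (congrArg (fun x => x = true) h)
    have hGe : (relation.getD i []).getD j 0 = relation[i][j] := by
      rw [hRow, List.getD_eq_getElem _ 0 hj']
    rw [hGe]
    constructor
    · intro hz
      have := h'.mp hz
      omega
    · rintro rfl
      exact h'.mpr rfl
  · rintro hall p ⟨i, hi, rfl⟩ q ⟨j, hj, rfl⟩
    simp only at hj ⊢
    have hRow : relation.getD i [] = relation[i] := List.getD_eq_getElem relation [] hi
    have hj'' : j < (relation.getD i []).length := by rw [hRow]; exact hj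
    have h := hall i hi j hj''
    have hGe : (relation.getD i []).getD j 0 = relation[i][j] := by
      rw [hRow, List.getD_eq_getElem _ 0 hj]
    rw [hGe] at h
    by_cases hz : relation[i][j] = 0
    · have hij : i = j := h.mp hz
      subst hij
      simp [hz]
    · have hij : ¬ i = j := fun e => hz (h.mpr e)
      simpa [hz] using hij

theorem unchanged_iff (relation : List (List Int))
    (hpre : Pre_isStrongAntireflexive relation)
    (hnd : ¬ D_isStrongAntireflexive relation) :
    (isStrongAntireflexive relation = true ↔ isStrongAntireflexive_alt relation = true) := by
  rw [isStrongAntireflexive_iff, isStrongAntireflexive_alt_iff]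
  rcases hpre with ⟨i, hi, hpref, hir, hne⟩ | ⟨hdiag, hrest⟩
  · -- phase 1 returns False: an in-range nonzero diagonal cell falsifies both sides
    constructor
    · intro h; exact absurd (h.1 i hi) hne
    · intro h; exact absurd ((h i hi i hir).mpr rfl) hne
  · rcases hrest with hlong | ⟨a, ha, b, hb, hab, hbr, hbz, -⟩
    · by_cases hoff : ∀ i < relation.length, ∀ j < relation.length, i ≠ j →
          (relation.getD i []).getD j 0 ≠ 0
      · -- A is True; ¬D_ rules out a zero beyond column n, so B is True too
        constructor
        · intro _ i hi j hj
          constructor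
          · intro hz
            by_contra hij
            by_cases hjn : j < relation.length
            · exact hoff i hi j hjn hij hz
            · exact hnd ⟨hdiag, fun a ha b hb hab =>
                ⟨lt_of_lt_of_le hb (hlong a ha), hoff a ha b hb hab⟩,
                i, hi, j, hj, by omega, hz⟩
          · rintro rfl
            exact (hdiag i hi).2
        · intro _
          exact ⟨fun i hi => (hdiag i hi).2, hoff⟩
      · -- an in-range off-diagonal zero inside the first n columns falsifies both sides
        push Not at hoff
        obtain ⟨i, hi, j, hj, hij, hz⟩ := hoff
        have hz' : (relation.getD i []).getD j 0 = 0 := by simpa using hz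
        have hjr : j < (relation.getD i []).length := lt_of_lt_of_le hj (hlong i hi)
        constructor
        · intro h; exact absurd (h.2 i hi j hj hij) (by simpa using hz)
        · intro h; exact absurd ((h i hi j hjr).mp hz') hij
    · -- Python's early-return witness: an in-range off-diagonal zero falsifies both sides
      constructor
      · intro h; exact absurd (h.2 a ha b hb hab) (by simpa using hbz)
      · intro h; exact absurd ((h a ha b hbr).mp hbz) hab

-- ===== VERDICT (by name: the statement is the Claim_ definition above) =====
theorem isStrongAntireflexive_spec : Claim_unchanged_isStrongAntireflexive := by
  intro relation _ hpre
  unfold Spec_isStrongAntireflexive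
  intro hnd
  have h := unchanged_iff relation hpre hnd
  cases hA : isStrongAntireflexive relation <;> cases hB : isStrongAntireflexive_alt relation
  · rfl
  · exact absurd (h.mpr hB) (by simp [hA])
  · exact absurd (h.mp hA) (by simp [hB])
  · rfl

theorem isStrongAntireflexive_changed : Claim_changed_isStrongAntireflexive := by
  unfold Claim_changed_isStrongAntireflexive; decide

theorem isStrongAntireflexive_tight : Claim_exact_isStrongAntireflexive := by
  intro relation _ _ hd
  obtain ⟨hdiag, hoff, i, hi, j, hj, hnj, hz⟩ := hd
  have hA : isStrongAntireflexive relation = true :=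
    (isStrongAntireflexive_iff relation).mpr
      ⟨fun a ha => (hdiag a ha).2, fun a ha b hb hab => (hoff a ha b hb hab).2⟩
  have hB : isStrongAntireflexive_alt relation ≠ true := by
    intro h
    have := ((isStrongAntireflexive_alt_iff relation).mp h i hi j hj).mp hz
    omega
  rw [hA]
  exact fun e => hB e.symm
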